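-- pv_equiv track=rewrite | github.com/DDD-Enterprises/dopemux-mvp | genetic_agent/genetic_agent/genetic_agent/genetic/failure_analysis.py | _identify_pattern_correlations
-- ===== SOURCE A (Python) =====
-- from typing import Dict, List, Any, Optional, Tuple
--
-- def _identify_pattern_correlations(
--
--     failure_signals: List[str],
--     context: Dict[str, Any]
-- ) -> Dict[str, Any]:
--     """Identify correlations between failure signals and context."""
--
--     correlations = {
--         'complexity_vs_signals': [],
--         'patterns_vs_success': [],
--         'signal_clusters': []
--     }
--
--     # Analyze complexity correlations
--     complexity_score = context.get('complexity', {}).get('score', 0.5)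
--
--     # Group related signals
--     complexity_signals = [s for s in failure_signals if 'complexity' in s]
--     pattern_signals = [s for s in failure_signals if 'patterns' in s]
--     llm_signals = [s for s in failure_signals if 'llm' in s.lower()]
--
--     correlations['signal_clusters'] = {
--         'complexity_related': len(complexity_signals),
--         'pattern_related': len(pattern_signals),
--         'llm_related': len(llm_signals)
--     }
--
--     return correlations
-- ===== SOURCE B (Python) =====
-- def _identify_pattern_correlations(failure_signals, context):
--     complexity_count = 0
--     pattern_count = 0
--     llm_count = 0
--     for s in failure_signals:
--         if 'complexity' in s:
--             complexity_count += 1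
--         if 'patterns' in s:
--             pattern_count += 1
--         if 'llm' in s.lower():
--             llm_count += 1
--     return {
--         'complexity_vs_signals': [],
--         'patterns_vs_success': [],
--         'signal_clusters': {
--             'complexity_related': complexity_count,
--             'pattern_related': pattern_count,
--             'llm_related': llm_count,
--         },
--     }
-- ===== Notes on version B (the rewrite author's own statement) =====
-- stated objective: simpler
-- what changed: Replaced the three separate list-comprehension scans (plus the never-used complexity_score lookup) with a single pass over failure_signals that keeps three integer counters and builds the result dict directly.
import Mathlib
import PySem

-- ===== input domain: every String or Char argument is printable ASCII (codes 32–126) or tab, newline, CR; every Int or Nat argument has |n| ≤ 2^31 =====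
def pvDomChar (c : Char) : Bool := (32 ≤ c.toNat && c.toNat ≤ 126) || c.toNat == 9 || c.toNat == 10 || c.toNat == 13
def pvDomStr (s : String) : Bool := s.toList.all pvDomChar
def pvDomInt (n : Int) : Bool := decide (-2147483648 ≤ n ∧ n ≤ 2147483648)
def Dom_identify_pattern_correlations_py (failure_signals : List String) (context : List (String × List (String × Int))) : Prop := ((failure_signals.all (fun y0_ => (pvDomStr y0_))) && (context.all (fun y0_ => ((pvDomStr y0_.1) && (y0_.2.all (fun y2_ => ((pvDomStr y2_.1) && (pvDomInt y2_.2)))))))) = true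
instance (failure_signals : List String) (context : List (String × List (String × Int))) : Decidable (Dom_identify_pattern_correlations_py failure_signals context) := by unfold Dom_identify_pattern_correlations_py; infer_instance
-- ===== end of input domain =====

-- B replaces A's three list-comprehension scans by one loop keeping three counters (objective: simpler).
-- A's `complexity_score` is computed but never used (dead code, a float); it cannot affect the result, so it is not ported.

-- ===== PORT A =====
def identify_pattern_correlations_py (failure_signals : List String) (context : List (String × List (String × Int))) : List (String × List (String × Int)) :=
  let _ := context  -- context is only read for the dead `complexity_score`
  let correlations : PySem.Dict String (List (String × Int)) :=
    PySem.Dict.ofList [("complexity_vs_signals", []), ("patterns_vs_success", []), ("signal_clusters", [])]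
  let complexity_signals := failure_signals.filter (fun s => PySem.Str.isIn "complexity" s)
  let pattern_signals := failure_signals.filter (fun s => PySem.Str.isIn "patterns" s)
  let llm_signals := failure_signals.filter (fun s => PySem.Str.isIn "llm" (PySem.Str.lower s))
  (correlations.insert "signal_clusters"
    [("complexity_related", (complexity_signals.length : Int)),
     ("pattern_related", (pattern_signals.length : Int)),
     ("llm_related", (llm_signals.length : Int))]).items

-- ===== PORT B =====
def identify_pattern_correlations_py_alt (failure_signals : List String) (context : List (String × List (String × Int))) : List (String × List (String × Int)) :=
  let _ := context
  let counts : Int × Int × Int := failure_signals.foldl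
    (fun (acc : Int × Int × Int) s =>
      let acc := if PySem.Str.isIn "complexity" s then (acc.1 + 1, acc.2.1, acc.2.2) else acc
      let acc := if PySem.Str.isIn "patterns" s then (acc.1, acc.2.1 + 1, acc.2.2) else acc
      if PySem.Str.isIn "llm" (PySem.Str.lower s) then (acc.1, acc.2.1, acc.2.2 + 1) else acc)
    (0, 0, 0)
  [("complexity_vs_signals", []), ("patterns_vs_success", []),
   ("signal_clusters",
     [("complexity_related", counts.1),
      ("pattern_related", counts.2.1),
      ("llm_related", counts.2.2)])]

-- ===== PRECONDITION & SPEC =====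
def Spec_identify_pattern_correlations_py (failure_signals : List String) (context : List (String × List (String × Int))) (out : List (String × List (String × Int))) : Prop := out = identify_pattern_correlations_py_alt failure_signals context
instance (failure_signals : List String) (context : List (String × List (String × Int))) (out : List (String × List (String × Int))) : Decidable (Spec_identify_pattern_correlations_py failure_signals context out) := by unfold Spec_identify_pattern_correlations_py; infer_instance

-- ===== CLAIM (what is proved, stated in full; the proofs are below) =====
def Claim_equal_identify_pattern_correlations_py : Prop := ∀ (failure_signals : List String) (context : List (String × List (String × Int))), Dom_identify_pattern_correlations_py failure_signals context → Spec_identify_pattern_correlations_py failure_signals context (identify_pattern_correlations_py failure_signals context)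

-- ===== LEMMAS AND PROOFS =====

-- B's single fold with three counters computes the three countP's of A's filters.
theorem fold3_eq (l : List String) (a b c : Int) :
    l.foldl
      (fun (acc : Int × Int × Int) s =>
        let acc := if PySem.Str.isIn "complexity" s then (acc.1 + 1, acc.2.1, acc.2.2) else acc
        let acc := if PySem.Str.isIn "patterns" s then (acc.1, acc.2.1 + 1, acc.2.2) else acc
        if PySem.Str.isIn "llm" (PySem.Str.lower s) then (acc.1, acc.2.1, acc.2.2 + 1) else acc)
      (a, b, c)
    = (a + (l.countP (fun s => PySem.Str.isIn "complexity" s) : Int),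
       b + (l.countP (fun s => PySem.Str.isIn "patterns" s) : Int),
       c + (l.countP (fun s => PySem.Str.isIn "llm" (PySem.Str.lower s)) : Int)) := by
  induction l generalizing a b c with
  | nil => simp
  | cons x xs ih =>
    simp only [List.foldl_cons, List.countP_cons]
    split_ifs <;>
      simp only [ih, Prod.mk.injEq] <;>
      refine ⟨by push_cast; ring, by push_cast; ring, by push_cast; ring⟩

-- ===== VERDICT (by name: the statement is the Claim_ definition above) =====
theorem identify_pattern_correlations_py_spec : Claim_equal_identify_pattern_correlations_py := by
  intro fs ctx _
  show _ = _
  simp only [identify_pattern_correlations_py, identify_pattern_correlations_py_alt, fold3_eq,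
    List.countP_eq_length_filter, zero_add]
  rfl
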